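-- pv_equiv track=rewrite | github.com/sytelus/nanuGPT | scripts/datasets/gsm8k/dag_sampler.py | _compute_out_neighbors
-- ===== SOURCE A (Python) =====
-- from typing import Dict, Iterable, Iterator, List, Tuple
--
-- def _compute_out_neighbors(rows: List[int]) -> List[List[int]]:
--     N = len(rows)
--     out_nbrs: List[List[int]] = [[] for _ in range(N)]
--     for i in range(N):
--         x = rows[i]
--         while x:
--             lsb = x & -x
--             j = (lsb.bit_length() - 1)
--             out_nbrs[i].append(j)
--             x ^= lsb
--     return out_nbrs
-- ===== SOURCE B (Python) =====
-- def _compute_out_neighbors(rows):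
--     out_nbrs = []
--     for x in rows:
--         out_nbrs.append([j for j in range(x.bit_length()) if (x >> j) & 1])
--     return out_nbrs
-- ===== Notes on version B (the rewrite author's own statement) =====
-- stated objective: idiomatic
-- what changed: B scans every bit position j in range(x.bit_length()) and keeps those with (x >> j) & 1 set, instead of A's in-place loop that repeatedly isolates and clears the lowest set bit with x & -x; Pre_ restricts to nonnegative rows, on which A terminates (A loops forever on a negative row).
import Mathlib
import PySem

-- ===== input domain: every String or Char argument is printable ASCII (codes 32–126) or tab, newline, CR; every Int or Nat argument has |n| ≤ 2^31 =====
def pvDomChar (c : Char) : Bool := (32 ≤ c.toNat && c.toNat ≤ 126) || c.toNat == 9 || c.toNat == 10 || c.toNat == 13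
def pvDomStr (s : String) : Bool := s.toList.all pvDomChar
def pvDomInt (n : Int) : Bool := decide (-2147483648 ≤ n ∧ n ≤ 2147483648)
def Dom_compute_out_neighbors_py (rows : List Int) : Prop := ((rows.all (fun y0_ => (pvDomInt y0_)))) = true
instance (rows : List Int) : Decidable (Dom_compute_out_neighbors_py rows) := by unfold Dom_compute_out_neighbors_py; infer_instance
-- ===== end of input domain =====

-- B replaces A's lowest-set-bit isolation loop (x & -x) by an idiomatic positional
-- scan over range(x.bit_length()); equivalence is claimed on nonnegative rows
-- (Pre_), since Python A never terminates on a negative row.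

-- Python's int.bit_length for nonnegative n: 0 for 0, else 1 + bit_length (n // 2).
def pvBitLength : Nat → Nat
  | 0 => 0
  | (n+1) => pvBitLength ((n+1)/2) + 1
decreasing_by exact Nat.div_lt_self (Nat.succ_pos n) (by omega)

-- ===== PORT A =====
-- A's inner `while x:` loop, stated on Nat (Pre_ gives x ≥ 0; on a negative row the
-- Python loop never terminates).  For x = n+1 > 0: `x & -x` is x - (x &&& (x-1)),
-- and `x ^= lsb` clears that lowest set bit, i.e. x becomes x &&& (x-1); both are
-- exact on nonnegative x.
def pvLsbLoop : Nat → List Int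
  | 0 => []
  | (n+1) =>
    let rest := (n+1) &&& n          -- x ^ lsb
    let lsb := (n+1) - rest          -- x & -x
    ((pvBitLength lsb - 1 : Nat) : Int) :: pvLsbLoop rest
decreasing_by exact Nat.lt_succ_of_le (Nat.and_le_right)

def compute_out_neighbors_py (rows : List Int) : List (List Int) :=
  rows.map (fun x => pvLsbLoop x.toNat)

-- ===== PORT B =====
-- `[j for j in range(x.bit_length()) if (x >> j) & 1]`, via PySem's Python-exact
-- bitLength, arithmetic shift and band.
def compute_out_neighbors_py_alt (rows : List Int) : List (List Int) :=
  rows.map (fun x =>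
    ((List.range (PySem.Int.bitLength x)).filter
        (fun j : Nat => PySem.Int.band (x >>> j) 1 == 1)).map (fun j => Int.ofNat j))

-- ===== PRECONDITION & SPEC =====
-- Pre_ excludes rows containing a negative entry: there Python A's `while x:` loop
-- never terminates (x & -x keeps x negative), so A returns on exactly these inputs.
def Pre_compute_out_neighbors_py (rows : List Int) : Prop := ∀ x ∈ rows, 0 ≤ x
instance (rows : List Int) : Decidable (Pre_compute_out_neighbors_py rows) := by unfold Pre_compute_out_neighbors_py; infer_instance

def pvWitness_compute_out_neighbors_py : List Int := [0, 5, 12, 2147483647]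

def Spec_compute_out_neighbors_py (rows : List Int) (out : List (List Int)) : Prop := out = compute_out_neighbors_py_alt rows
instance (rows : List Int) (out : List (List Int)) : Decidable (Spec_compute_out_neighbors_py rows out) := by unfold Spec_compute_out_neighbors_py; infer_instance

-- ===== CLAIM (what is proved, stated in full; the proofs are below) =====
def Claim_equal_compute_out_neighbors_py : Prop := ∀ (rows : List Int), Dom_compute_out_neighbors_py rows → Pre_compute_out_neighbors_py rows → Spec_compute_out_neighbors_py rows (compute_out_neighbors_py rows)

-- ===== LEMMAS AND PROOFS =====

theorem pv_tb1 (m k : Nat) : (2*m+1).testBit (k+1) = m.testBit k := by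
  have h : (2*m+1)/2 = m := by omega
  rw [Nat.testBit_succ, h]

theorem pv_tb0 (m k : Nat) : (2*m).testBit (k+1) = m.testBit k := by
  have h : (2*m)/2 = m := by omega
  rw [Nat.testBit_succ, h]

theorem pv_and_odd (m : Nat) : (2*m+1) &&& (2*m) = 2*m := by
  apply Nat.eq_of_testBit_eq; intro k
  rw [Nat.testBit_land]
  cases k with
  | zero => simp
  | succ k => simp [pv_tb1, pv_tb0]

theorem pv_and_even (m : Nat) (h : 0 < m) : (2*m) &&& (2*m-1) = 2*(m &&& (m-1)) := by
  obtain ⟨p, rfl⟩ : ∃ p, m = p+1 := ⟨m-1, by omega⟩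
  apply Nat.eq_of_testBit_eq; intro k
  have e : 2*(p+1)-1 = 2*p+1 := by omega
  rw [e, Nat.testBit_land]
  cases k with
  | zero => simp
  | succ k => simp [pv_tb1, pv_tb0]

theorem pv_and_pred_lt (m : Nat) (h : 0 < m) : m &&& (m-1) < m :=
  Nat.lt_of_le_of_lt Nat.and_le_right (by omega)

theorem pvBitLength_zero : pvBitLength 0 = 0 := by simp [pvBitLength]

theorem pvBitLength_two_mul (m : Nat) (h : 0 < m) : pvBitLength (2*m) = pvBitLength m + 1 := by
  obtain ⟨p, rfl⟩ : ∃ p, m = p+1 := ⟨m-1, by omega⟩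
  have e : 2*(p+1) = (2*p+1)+1 := by omega
  rw [e, pvBitLength]
  have e2 : (2*p+1+1)/2 = p+1 := by omega
  rw [e2]

theorem pvBitLength_two_mul_add_one (m : Nat) : pvBitLength (2*m+1) = pvBitLength m + 1 := by
  rw [pvBitLength]
  have e : (2*m+1)/2 = m := by omega
  rw [e]

theorem pvBitLength_one : pvBitLength 1 = 1 := by
  rw [pvBitLength]
  norm_num [pvBitLength_zero]

-- A's loop on an odd number: chop off bit 0.
theorem pvLsbLoop_odd (m : Nat) : pvLsbLoop (2*m+1) = 0 :: pvLsbLoop (2*m) := by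
  rw [pvLsbLoop]
  simp [pv_and_odd, pvBitLength_one]

-- A's loop on an even number: the whole run is the run of m shifted up by one.
theorem pvLsbLoop_even (m : Nat) : pvLsbLoop (2*m) = (pvLsbLoop m).map (fun a => a + 1) := by
  induction m using Nat.strong_induction_on with
  | _ m ih =>
    match m with
    | 0 => simp [pvLsbLoop]
    | (p+1) =>
      have hm : 0 < p+1 := Nat.succ_pos p
      have e : 2*(p+1) = (2*(p+1)-1)+1 := by omega
      rw [e, pvLsbLoop]
      have e1 : 2*(p+1)-1+1 = 2*(p+1) := by omega
      rw [e1, pv_and_even (p+1) hm]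
      simp only [Nat.add_sub_cancel]
      have elsb : 2*(p+1) - 2*((p+1) &&& p) = 2*((p+1) - ((p+1) &&& p)) := by
        have := Nat.and_le_right (n := p+1) (m := p)
        omega
      have hlsb : 0 < (p+1) - ((p+1) &&& p) := by
        have : (p+1) &&& ((p+1)-1) < p+1 := pv_and_pred_lt (p+1) hm
        simp only [Nat.add_sub_cancel] at this; omega
      rw [elsb, pvBitLength_two_mul _ hlsb,
          ih ((p+1) &&& p) (by
            have := pv_and_pred_lt (p+1) hm
            simpa using this)]
      -- unfold pvLsbLoop (p+1) on the right
      conv_rhs => rw [pvLsbLoop]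
      simp only [Nat.add_sub_cancel, List.map_cons]
      congr 1
      have hbl : 0 < pvBitLength ((p+1) - ((p+1) &&& p)) := by
        obtain ⟨q, hq⟩ : ∃ q, (p+1) - ((p+1) &&& p) = q+1 := ⟨_, (Nat.succ_pred_eq_of_pos hlsb).symm⟩
        rw [hq, pvBitLength]; omega
      omega

-- B's per-row computation, split into its Nat-valued index list and the cast.
def pvBitsN (n : Nat) : List Nat :=
  (List.range (pvBitLength n)).filter (fun j => (n >>> j) &&& 1 == 1)

def pvBits (n : Nat) : List Int :=
  ((List.range (pvBitLength n)).filter (fun j => (n >>> j) &&& 1 == 1)).map (fun j => Int.ofNat j)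

theorem pvBits_eq (n : Nat) : pvBits n = (pvBitsN n).map (fun j => Int.ofNat j) := rfl

theorem pv_shift_parity (n j : Nat) : ((n >>> j) &&& 1 == 1) = (n / 2^j % 2 == 1) := by
  rw [Nat.shiftRight_eq_div_pow, Nat.and_one_is_mod]

theorem pv_pred_succ (m j : Nat) (r : Nat) (hr : r = 2*m ∨ r = 2*m+1) :
    ((fun i => (r >>> i) &&& 1 == 1) ∘ Nat.succ) j = ((m >>> j) &&& 1 == 1) := by
  have hd : r / 2^(j+1) = m / 2^j := by
    rw [pow_succ', ← Nat.div_div_eq_div_mul]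
    congr 1; omega
  simp only [Function.comp_apply, pv_shift_parity, hd]

theorem pvBitsN_odd (m : Nat) : pvBitsN (2*m+1) = 0 :: (pvBitsN m).map Nat.succ := by
  unfold pvBitsN
  rw [pvBitLength_two_mul_add_one, List.range_succ_eq_map, List.filter_cons,
      if_pos (by simp), List.filter_map,
      List.filter_congr (fun j _ => pv_pred_succ m j (2*m+1) (Or.inr rfl))]

theorem pvBitsN_even (m : Nat) (h : 0 < m) : pvBitsN (2*m) = (pvBitsN m).map Nat.succ := by
  unfold pvBitsN
  rw [pvBitLength_two_mul m h, List.range_succ_eq_map, List.filter_cons,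
      if_neg (by simp), List.filter_map,
      List.filter_congr (fun j _ => pv_pred_succ m j (2*m) (Or.inl rfl))]

theorem pv_map_cast_succ (l : List Nat) :
    (l.map Nat.succ).map (fun j => Int.ofNat j) =
      (l.map (fun j => Int.ofNat j)).map (fun a => a + 1) := by
  simp only [List.map_map]
  apply List.map_congr_left
  intro j _
  simp only [Function.comp_apply, Int.ofNat_eq_natCast]
  push_cast
  ring

theorem pvBits_odd (m : Nat) : pvBits (2*m+1) = 0 :: (pvBits m).map (fun a => a + 1) := by
  rw [pvBits_eq, pvBits_eq, pvBitsN_odd, List.map_cons, pv_map_cast_succ]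
  norm_num

theorem pvBits_even (m : Nat) (h : 0 < m) : pvBits (2*m) = (pvBits m).map (fun a => a + 1) := by
  rw [pvBits_eq, pvBits_eq, pvBitsN_even m h, pv_map_cast_succ]

-- The two per-row computations agree on every Nat.
theorem pvLsbLoop_eq_pvBits (n : Nat) : pvLsbLoop n = pvBits n := by
  induction n using Nat.strong_induction_on with
  | _ n ih =>
    obtain ⟨m, rfl | rfl⟩ : ∃ m, n = 2*m ∨ n = 2*m+1 := ⟨n/2, by omega⟩
    · match m with
      | 0 => simp [pvLsbLoop, pvBits, pvBitLength_zero]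
      | (p+1) =>
        rw [pvLsbLoop_even, pvBits_even _ (Nat.succ_pos p), ih (p+1) (by omega)]
    · rw [pvLsbLoop_odd, pvLsbLoop_even, pvBits_odd, ih m (by omega)]

-- Python's int.bit_length agrees with pvBitLength on nonnegative values.
theorem pvBitLength_int (n : Nat) : PySem.Int.bitLength (n : Int) = pvBitLength n := by
  induction n using Nat.strong_induction_on with
  | _ n ih =>
    match n with
    | 0 => simp [PySem.Int.bitLength_zero, pvBitLength_zero]
    | (p+1) =>
      rw [PySem.Int.bitLength_natCast (Nat.succ_pos p), pvBitLength,
          ih ((p+1)/2) (Nat.div_lt_self (Nat.succ_pos p) (by omega))]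

-- B's per-row expression reduces to pvBits on a nonnegative row.
theorem pvRowB_eq_pvBits (x : Int) (hx : 0 ≤ x) :
    ((List.range (PySem.Int.bitLength x)).filter
        (fun j : Nat => PySem.Int.band (x >>> j) 1 == 1)).map (fun j => Int.ofNat j) =
      pvBits x.toNat := by
  obtain ⟨n, rfl⟩ : ∃ n : Nat, x = (n : Int) := ⟨x.toNat, (Int.toNat_of_nonneg hx).symm⟩
  rw [pvBits_eq]
  unfold pvBitsN
  rw [Int.toNat_natCast, pvBitLength_int]
  congr 1
  apply List.filter_congr
  intro j _
  have hs : ((n : Int) >>> j) = ((n >>> j : Nat) : Int) := rfl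
  have hb : PySem.Int.band ((n >>> j : Nat) : Int) 1 = (((n >>> j) &&& 1 : Nat) : Int) := by
    exact_mod_cast PySem.Int.band_natCast (n >>> j) 1
  rw [hs, hb]
  simp
  rw [hs]
  norm_cast

-- ===== VERDICT (by name: the statement is the Claim_ definition above) =====
theorem compute_out_neighbors_py_spec : Claim_equal_compute_out_neighbors_py := by
  intro rows _ hpre
  unfold Spec_compute_out_neighbors_py compute_out_neighbors_py compute_out_neighbors_py_alt
  apply List.map_congr_left
  intro x hx
  rw [pvRowB_eq_pvBits x (hpre x hx)]
  exact pvLsbLoop_eq_pvBits x.toNat
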